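-- pv_equiv track=rewrite | github.com/Zhanlwen0410/Bunseki | scripts/build_wlsp_lexicon.py | wlsp_code_candidates
-- ===== SOURCE A (Python) =====
-- def wlsp_code_candidates(code: str) -> list[str]:
--     """
--     Build key candidates from most specific to most general.
--     Example: 1.1527 -> [1.1527, 1.152, 1.15, 1.1]
--     """
--     if "." not in code:
--         return [code]
--     head, tail = code.split(".", 1)
--     candidates = [code]
--     for n in range(len(tail) - 1, 0, -1):
--         candidates.append(f"{head}.{tail[:n]}")
--     return candidates
-- ===== SOURCE B (Python) =====
-- def wlsp_code_candidates(code: str) -> list[str]: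
--     """
--     Build key candidates from most specific to most general by growing
--     prefixes forward: starting from the head plus the dot, append one
--     character of the remainder at a time, collect each grown prefix in
--     ascending order, then reverse the list.
--     """
--     i = code.find(".")
--     if i == -1 or i == len(code) - 1:
--         return [code]
--     cur = code[: i + 1]
--     asc = []
--     for ch in code[i + 1 :]:
--         cur += ch
--         asc.append(cur)
--     asc.reverse()
--     return asc
-- ===== Notes on version B (the rewrite author's own statement) =====
-- stated objective: alternative
-- what changed: B builds the candidates in the opposite direction: instead of splitting at the dot and re-slicing the tail at each decreasing length, it grows a single prefix forward one character at a time past the dot, collects each grown prefix in ascending order, and reverses the list at the end.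
import Mathlib
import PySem

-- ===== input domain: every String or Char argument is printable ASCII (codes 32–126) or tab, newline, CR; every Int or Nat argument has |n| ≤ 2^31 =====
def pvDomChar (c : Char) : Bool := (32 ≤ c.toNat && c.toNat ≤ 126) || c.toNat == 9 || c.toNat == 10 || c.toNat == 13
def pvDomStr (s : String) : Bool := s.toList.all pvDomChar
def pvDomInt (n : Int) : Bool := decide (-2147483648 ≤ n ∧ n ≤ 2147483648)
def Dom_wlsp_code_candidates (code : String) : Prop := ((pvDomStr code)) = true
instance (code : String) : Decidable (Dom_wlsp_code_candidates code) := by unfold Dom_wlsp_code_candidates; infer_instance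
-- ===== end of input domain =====

-- B builds the candidates in the opposite direction: instead of A's split at the dot and
-- re-slicing the tail at each decreasing length, B grows one prefix forward, appending one
-- character after the dot at a time, collecting each grown prefix and reversing at the end
-- (alternative decomposition, same cost).

-- ===== PORT A =====
-- literal port of A: split on the first '.', then for n in range(len(tail)-1, 0, -1)
-- append f"{head}.{tail[:n]}" (the f-string ported as head ++ '.' :: tail[:n] on List Char)
def wlsp_code_candidates (code : String) : List String :=
  if PySem.Chars.isIn ['.'] code.toList = false then [String.ofList code.toList]
  else
    match PySem.Chars.splitOnMax code.toList ['.'] 1 with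
    | [head, tail] =>
        (PySem.List.pyRange ((tail.length : Int) - 1) 0 (-1)).foldl
          (fun acc n => acc ++ [String.ofList (head ++ '.' :: PySem.Chars.slice tail none (some n))])
          [String.ofList code.toList]
    | _ => [String.ofList code.toList]   -- unreachable: split(".", 1) yields exactly two pieces when '.' is in code

-- ===== PORT B =====
-- port of Source B: i = code.find("."); guard; then one forward pass growing cur by one char,
-- appending each grown prefix to asc; finally asc.reverse()
def wlsp_code_candidates_alt (code : String) : List String :=
  let cs := code.toList
  let i := PySem.Chars.find cs ['.']
  if i == -1 || i == PySem.Chars.len cs - 1 then [String.ofList cs]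
  else
    let st := (PySem.Chars.slice cs (some (i + 1)) none).foldl
      (fun (st : List Char × List (List Char)) ch =>
        (st.1 ++ [ch], st.2 ++ [st.1 ++ [ch]]))
      (PySem.Chars.slice cs none (some (i + 1)), [])
    st.2.reverse.map String.ofList

-- ===== PRECONDITION & SPEC =====
def Spec_wlsp_code_candidates (code : String) (out : List String) : Prop := out = wlsp_code_candidates_alt code
instance (code : String) (out : List String) : Decidable (Spec_wlsp_code_candidates code out) := by unfold Spec_wlsp_code_candidates; infer_instance

-- ===== CLAIM (what is proved, stated in full; the proofs are below) =====
def Claim_equal_wlsp_code_candidates : Prop := ∀ (code : String), Dom_wlsp_code_candidates code → Spec_wlsp_code_candidates code (wlsp_code_candidates code)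

-- ===== LEMMAS AND PROOFS =====

lemma splitOnMax_go_zero (fuel : Nat) (t : List Char) (acc : List (List Char)) :
    PySem.Chars.splitOnMax.go ['.'] fuel 0 t [] acc = (t :: acc).reverse := by
  cases fuel with
  | zero => simp [PySem.Chars.splitOnMax.go]
  | succ f => cases t <;> simp [PySem.Chars.splitOnMax.go]

lemma splitOnMax_go_skip (h t cur : List Char) (acc : List (List Char)) (fuel : Nat)
    (hh : '.' ∉ h) (hf : h.length < fuel) :
    PySem.Chars.splitOnMax.go ['.'] fuel 1 (h ++ '.' :: t) cur acc
      = (t :: (cur.reverse ++ h) :: acc).reverse := by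
  induction h generalizing cur fuel with
  | nil =>
      obtain ⟨f, rfl⟩ : ∃ f, fuel = f + 1 := ⟨fuel - 1, by omega⟩
      simp [PySem.Chars.splitOnMax.go, List.isPrefixOf, splitOnMax_go_zero]
  | cons c h ih =>
      obtain ⟨f, rfl⟩ : ∃ f, fuel = f + 1 := ⟨fuel - 1, by omega⟩
      simp only [List.mem_cons, not_or] at hh
      have hc : ('.' == c) = false := beq_eq_false_iff_ne.mpr hh.1
      have := ih (cur := c :: cur) (fuel := f) hh.2
        (by simp only [List.length_cons] at hf; omega)
      simpa [PySem.Chars.splitOnMax.go, List.isPrefixOf, hc] using this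

lemma splitOnMax_first_dot (h t : List Char) (hh : '.' ∉ h) :
    PySem.Chars.splitOnMax (h ++ '.' :: t) ['.'] 1 = [h, t] := by
  rw [PySem.Chars.splitOnMax]
  norm_num
  rw [splitOnMax_go_skip h t [] [] _ hh (by simp)]
  simp

-- code.find(".") points at the first dot
lemma find_go_first_dot (h t : List Char) (k : Nat) (hh : '.' ∉ h) :
    PySem.Chars.find.go ['.'] (h ++ '.' :: t) k = (k : Int) + h.length := by
  induction h generalizing k with
  | nil => simp [PySem.Chars.find.go, List.isPrefixOf]
  | cons c h ih =>
      simp only [List.mem_cons, not_or] at hh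
      have hc : ('.' == c) = false := beq_eq_false_iff_ne.mpr hh.1
      have hrec := ih (k := k + 1) hh.2
      simp only [List.cons_append]
      rw [PySem.Chars.find.go.eq_def]
      simp only [List.isPrefixOf, hc, Bool.false_and, Bool.false_eq_true, if_false]
      rw [hrec]; simp only [List.length_cons]; push_cast; ring

lemma find_first_dot (h t : List Char) (hh : '.' ∉ h) :
    PySem.Chars.find (h ++ '.' :: t) ['.'] = (h.length : Int) := by
  rw [PySem.Chars.find, find_go_first_dot h t 0 hh]; simp

-- range(m - 1, 0, -1) as a map over List.range
lemma pyRange_down (m : Nat) :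
    PySem.List.pyRange ((m : Int) - 1) 0 (-1)
      = (List.range (m - 1)).map (fun (k : Nat) => (m : Int) - 1 - (k : Int)) := by
  rw [PySem.List.pyRange]
  rw [if_neg (by norm_num : ¬(-1 : Int) = 0)]
  rw [if_neg (by norm_num : ¬(0 : Int) < -1)]
  by_cases hm : (0 : Int) < (m : Int) - 1
  · rw [if_pos hm]
    have h2 : (((m : Int) - 1 - 0 + -(-1) - 1) / -(-1)).toNat = m - 1 := by
      norm_num
    simp only [h2]
    exact List.map_congr_left (fun k _ => by ring)
  · rw [if_neg hm]
    have h0 : m - 1 = 0 := by omega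
    simp [h0]

-- B's forward pass: growing 'cur' over t collects exactly the prefixes of growing length
lemma fold_grow (t : List Char) (pre : List Char) (asc : List (List Char)) :
    t.foldl (fun (st : List Char × List (List Char)) ch =>
        (st.1 ++ [ch], st.2 ++ [st.1 ++ [ch]])) (pre, asc)
      = (pre ++ t, asc ++ (List.range t.length).map (fun j => pre ++ t.take (j + 1))) := by
  induction t generalizing pre asc with
  | nil => simp
  | cons c t ih =>
      simp only [List.foldl_cons, ih, List.length_cons, List.range_succ_eq_map,
        List.map_cons, List.map_map]
      refine Prod.ext (by simp) ?_
      simp only [List.take_succ_cons, List.take_zero, List.append_assoc]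
      refine congrArg (asc ++ ·) ?_
      refine congrArg₂ (· :: ·) (by simp) ?_
      refine List.map_congr_left (fun k _ => ?_)
      simp [Function.comp]

lemma rev_map_range {α : Type} (n : Nat) (g : Nat → α) :
    ((List.range n).map g).reverse = (List.range n).map (fun k => g (n - 1 - k)) := by
  refine List.ext_getElem (by simp) (fun i h1 h2 => ?_)
  simp only [List.getElem_reverse, List.length_map, List.length_range,
    List.getElem_map, List.getElem_range]

-- decompose a string containing '.' at its first dot
lemma first_dot_decomp (cs : List Char) (hm : '.' ∈ cs) :
    ∃ h t, cs = h ++ '.' :: t ∧ '.' ∉ h := by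
  induction cs with
  | nil => simp at hm
  | cons c cs ih =>
      by_cases hc : c = '.'
      · exact ⟨[], cs, by simp [hc], by simp⟩
      · have hm' : '.' ∈ cs := by
          rcases List.mem_cons.mp hm with e | m
          · exact absurd e.symm hc
          · exact m
        obtain ⟨h, t, he, hhh⟩ := ih hm'
        refine ⟨c :: h, t, by simp [he], ?_⟩
        simp only [List.mem_cons, not_or]
        exact ⟨fun e => hc e.symm, hhh⟩

-- ===== VERDICT (by name: the statement is the Claim_ definition above) =====
theorem wlsp_code_candidates_spec : Claim_equal_wlsp_code_candidates := by
  intro code _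
  unfold Spec_wlsp_code_candidates wlsp_code_candidates wlsp_code_candidates_alt
  by_cases hm : '.' ∈ code.toList
  · have hIn : PySem.Chars.isIn ['.'] code.toList = true := by
      rw [PySem.Chars.isIn_iff_infix]
      exact (List.singleton_infix_iff _ _).mpr hm
    rw [hIn]
    simp only [Bool.true_eq_false, if_false]
    obtain ⟨h, t, he, hh⟩ := first_dot_decomp code.toList hm
    rw [he, splitOnMax_first_dot h t hh, find_first_dot h t hh]
    have hne1 : (((h.length : Int)) == -1) = false := by
      simp only [beq_eq_false_iff_ne]; omega
    by_cases ht : t = []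
    · subst ht
      have hlen : (((h.length : Int)) == PySem.Chars.len (h ++ ['.']) - 1) = true := by
        simp [PySem.Chars.len_eq]
      rw [hne1, hlen]
      simp only [Bool.false_or, if_true]
      show (PySem.List.pyRange (((0 : Nat) : Int) - 1) 0 (-1)).foldl _ _ = _
      rw [pyRange_down 0]
      simp
    · have hlen : (((h.length : Int)) == PySem.Chars.len (h ++ '.' :: t) - 1) = false := by
        simp only [beq_eq_false_iff_ne, PySem.Chars.len_eq, List.length_append,
          List.length_cons]
        have : t.length ≠ 0 := fun e => ht (List.eq_nil_of_length_eq_zero e)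
        push_cast
        omega
      rw [hne1, hlen]
      simp only [Bool.false_or, Bool.false_eq_true, if_false]
      have hs1 : PySem.Chars.slice (h ++ '.' :: t) none (some ((h.length : Int) + 1))
          = h ++ ['.'] := by
        have : (h.length : Int) + 1 = ((h.length + 1 : Nat) : Int) := by push_cast; ring
        rw [this, PySem.Chars.slice_eq_listSlice, PySem.List.slice_to_natCast]
        rw [show h ++ '.' :: t = (h ++ ['.']) ++ t by simp]
        rw [List.take_append_of_le_length (by simp)]
        simp
      have hs2 : PySem.Chars.slice (h ++ '.' :: t) (some ((h.length : Int) + 1)) none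
          = t := by
        have : (h.length : Int) + 1 = ((h.length + 1 : Nat) : Int) := by push_cast; ring
        rw [this, PySem.Chars.slice_eq_listSlice, PySem.List.slice_from_natCast]
        rw [show h ++ '.' :: t = (h ++ ['.']) ++ t by simp]
        rw [List.drop_append_of_le_length (by simp)]
        simp
      rw [hs1, hs2, fold_grow t (h ++ ['.']) []]
      simp only [List.nil_append]
      rw [rev_map_range]
      -- both sides are now maps over ranges; align them
      rw [PySem.List.foldl_append_singleton_eq_map, pyRange_down, List.map_map, List.map_map]
      obtain ⟨m, hm2⟩ : ∃ m, t.length = m + 1 :=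
        ⟨t.length - 1, by
          have : t.length ≠ 0 := fun e => ht (List.eq_nil_of_length_eq_zero e)
          omega⟩
      simp only [hm2, Nat.add_sub_cancel]
      rw [List.range_succ_eq_map (n := m), List.map_cons, List.map_map]
      simp only [Function.comp]
      have hhead : (h ++ ['.']) ++ t.take (m - 0 + 1)
          = h ++ '.' :: t := by
        have h1 : m - 0 + 1 = m + 1 := by omega
        rw [h1, List.take_of_length_le (le_of_eq hm2)]
        simp
      rw [hhead]
      refine congrArg₂ (· :: ·) rfl ?_
      refine List.map_congr_left (fun k hk => ?_)
      rw [List.mem_range] at hk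
      simp only [Function.comp_apply]
      have hc1 : ((m + 1 : Nat) : Int) - 1 - (k : Int) = ((m - k : Nat) : Int) := by
        push_cast; omega
      rw [hc1, PySem.Chars.slice_eq_listSlice, PySem.List.slice_to_natCast]
      have hc2 : m - Nat.succ k + 1 = m - k := by omega
      rw [hc2]
      simp
  · have hIn : PySem.Chars.isIn ['.'] code.toList = false := by
      rw [PySem.Chars.isIn_eq_false_iff]
      exact fun hinf => hm ((List.singleton_infix_iff _ _).mp hinf)
    have hfind : PySem.Chars.find code.toList ['.'] = -1 := by
      rw [PySem.Chars.find_eq_neg_one_iff]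
      exact fun hinf => hm ((List.singleton_infix_iff _ _).mp hinf)
    simp [hIn, hfind]
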